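-- pv_equiv track=rewrite | github.com/odylith/odylith | src/odylith/runtime/context_engine/tooling_context_routing.py | _guidance_coverage
-- ===== SOURCE A (Python) =====
-- from typing import Any, Mapping, Sequence
--
-- def _guidance_coverage(selected_guidance_chunks: Sequence[Mapping[str, Any]]) -> str:
--     tiers = {
--         str(row.get("match_tier", "")).strip()
--         for row in selected_guidance_chunks
--         if isinstance(row, Mapping) and str(row.get("match_tier", "")).strip()
--     }
--     if "direct_path" in tiers:
--         return "direct"
--     if "anchored_context" in tiers:
--         return "anchored"
--     if "canonical_source" in tiers or "note_match" in tiers or "task_family" in tiers: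
--         return "supporting"
--     return "none"
-- ===== SOURCE B (Python) =====
-- from typing import Any, Mapping, Sequence
--
-- _RANK = {
--     "direct_path": 0,
--     "anchored_context": 1,
--     "canonical_source": 2,
--     "note_match": 2,
--     "task_family": 2,
-- }
--
-- _LABELS = ("direct", "anchored", "supporting", "none")
--
--
-- def _guidance_coverage(selected_guidance_chunks: Sequence[Mapping[str, Any]]) -> str:
--     best = 3
--     for row in selected_guidance_chunks:
--         if not isinstance(row, Mapping):
--             continue
--         tier = str(row.get("match_tier", "")).strip()
--         if not tier:
--             continue
--         r = _RANK.get(tier, 3)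
--         if r < best:
--             best = r
--             if best == 0:
--                 break
--     return _LABELS[best]
-- ===== Notes on version B (the rewrite author's own statement) =====
-- stated objective: alternative
-- what changed: Replaces building the set of all match tiers followed by priority membership tests with a single scan that keeps the minimum tier rank (direct=0, anchored=1, supporting=2) with early exit on rank 0, converting the best rank back to the label at the end.
import Mathlib
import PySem

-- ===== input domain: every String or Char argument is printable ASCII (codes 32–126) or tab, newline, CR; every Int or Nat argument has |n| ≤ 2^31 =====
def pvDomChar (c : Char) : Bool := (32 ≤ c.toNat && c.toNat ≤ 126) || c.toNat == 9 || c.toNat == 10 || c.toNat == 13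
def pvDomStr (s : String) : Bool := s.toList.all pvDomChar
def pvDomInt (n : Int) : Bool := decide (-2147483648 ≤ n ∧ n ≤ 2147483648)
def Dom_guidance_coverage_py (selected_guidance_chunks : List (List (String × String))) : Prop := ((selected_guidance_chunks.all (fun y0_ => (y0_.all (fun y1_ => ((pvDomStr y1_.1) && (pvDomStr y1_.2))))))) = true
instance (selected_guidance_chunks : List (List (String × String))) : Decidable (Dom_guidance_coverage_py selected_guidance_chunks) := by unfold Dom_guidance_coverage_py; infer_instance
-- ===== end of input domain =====

-- B changes the decomposition: one left-to-right scan keeping the minimum match-tier rank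
-- (with early exit on rank 0) instead of building the set of tiers and testing memberships.

-- ===== PORT A =====
-- str(row.get("match_tier", "")).strip(); rows are dicts (str() is the identity on their string values)
def pvTierA (row : List (String × String)) : String :=
  PySem.Str.strip (PySem.Dict.getD (PySem.Dict.mk row) "match_tier" "")

def guidance_coverage_py (selected_guidance_chunks : List (List (String × String))) : String :=
  -- the set comprehension: isinstance(row, Mapping) is always true under the type convention
  let tiers : PySem.Set String :=
    PySem.Set.ofList ((selected_guidance_chunks.filter (fun row => pvTierA row ≠ "")).map pvTierA)
  if PySem.Set.contains tiers "direct_path" then "direct"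
  else if PySem.Set.contains tiers "anchored_context" then "anchored"
  else if PySem.Set.contains tiers "canonical_source" || PySem.Set.contains tiers "note_match" || PySem.Set.contains tiers "task_family" then "supporting"
  else "none"

-- ===== PORT B =====
-- the module-level _RANK dict of Source B
def pvRankTable : PySem.Dict String Nat :=
  PySem.Dict.mk [("direct_path", 0), ("anchored_context", 1), ("canonical_source", 2), ("note_match", 2), ("task_family", 2)]

-- the for-loop of Source B: running best rank, `continue` on empty tier, `break` when best hits 0
def pvBestRank : Nat → List (List (String × String)) → Nat
  | best, [] => best
  | best, row :: rest =>
      let tier := PySem.Str.strip (PySem.Dict.getD (PySem.Dict.mk row) "match_tier" "")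
      if tier = "" then pvBestRank best rest
      else
        let r := PySem.Dict.getD pvRankTable tier 3
        if r < best then (if r = 0 then r else pvBestRank r rest)
        else pvBestRank best rest

def guidance_coverage_py_alt (selected_guidance_chunks : List (List (String × String))) : String :=
  match pvBestRank 3 selected_guidance_chunks with
  | 0 => "direct"
  | 1 => "anchored"
  | 2 => "supporting"
  | _ => "none"

-- ===== PRECONDITION & SPEC =====
def Spec_guidance_coverage_py (selected_guidance_chunks : List (List (String × String))) (out : String) : Prop := out = guidance_coverage_py_alt selected_guidance_chunks
instance (selected_guidance_chunks : List (List (String × String))) (out : String) : Decidable (Spec_guidance_coverage_py selected_guidance_chunks out) := by unfold Spec_guidance_coverage_py; infer_instance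

-- ===== CLAIM (what is proved, stated in full; the proofs are below) =====
def Claim_equal_guidance_coverage_py : Prop := ∀ (selected_guidance_chunks : List (List (String × String))), Dom_guidance_coverage_py selected_guidance_chunks → Spec_guidance_coverage_py selected_guidance_chunks (guidance_coverage_py selected_guidance_chunks)

-- ===== LEMMAS AND PROOFS =====

-- rank of a row, as a single function (proof helper)
def pvRankOf (row : List (String × String)) : Nat :=
  if pvTierA row = "" then 3 else PySem.Dict.getD pvRankTable (pvTierA row) 3

theorem pvTable_eval (t : String) :
    PySem.Dict.getD pvRankTable t 3 =
      if t = "direct_path" then 0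
      else if t = "anchored_context" then 1
      else if t = "canonical_source" ∨ t = "note_match" ∨ t = "task_family" then 2
      else 3 := by
  by_cases h1 : t = "direct_path"
  · subst h1; decide
  by_cases h2 : t = "anchored_context"
  · subst h2; decide
  by_cases h3 : t = "canonical_source"
  · subst h3; decide
  by_cases h4 : t = "note_match"
  · subst h4; decide
  by_cases h5 : t = "task_family"
  · subst h5; decide
  rw [if_neg h1, if_neg h2, if_neg (by tauto : ¬(t = "canonical_source" ∨ t = "note_match" ∨ t = "task_family"))]
  rw [pvRankTable, PySem.Dict.getD_eq_get?_getD,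
      PySem.Dict.get?_mk_cons, if_neg (fun h => h1 (beq_iff_eq.mp h).symm),
      PySem.Dict.get?_mk_cons, if_neg (fun h => h2 (beq_iff_eq.mp h).symm),
      PySem.Dict.get?_mk_cons, if_neg (fun h => h3 (beq_iff_eq.mp h).symm),
      PySem.Dict.get?_mk_cons, if_neg (fun h => h4 (beq_iff_eq.mp h).symm),
      PySem.Dict.get?_mk_cons, if_neg (fun h => h5 (beq_iff_eq.mp h).symm)]
  rfl

theorem pvBestRank_le_iff (l : List (List (String × String))) :
    ∀ b k, b ≤ 3 → (pvBestRank b l ≤ k ↔ b ≤ k ∨ ∃ row ∈ l, pvRankOf row ≤ k) := by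
  induction l with
  | nil => intro b k _; simp [pvBestRank]
  | cons row rest ih =>
    intro b k hb
    simp only [pvBestRank]
    by_cases ht : PySem.Str.strip (PySem.Dict.getD (PySem.Dict.mk row) "match_tier" "") = ""
    · have hrk : pvRankOf row = 3 := by
        unfold pvRankOf pvTierA; rw [if_pos ht]
      rw [if_pos ht, ih b k hb, List.exists_mem_cons_iff, hrk]
      by_cases hE : (∃ s ∈ rest, pvRankOf s ≤ k) <;> simp [hE] <;> omega
    · set r := PySem.Dict.getD pvRankTable (PySem.Str.strip (PySem.Dict.getD (PySem.Dict.mk row) "match_tier" "")) 3 with hrdef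
      have hrk : pvRankOf row = r := by
        rw [hrdef]; unfold pvRankOf pvTierA; rw [if_neg ht]
      have hr3 : r ≤ 3 := by
        rw [hrdef]
        have := pvTable_eval (PySem.Str.strip (PySem.Dict.getD (PySem.Dict.mk row) "match_tier" ""))
        rw [this]; split_ifs <;> omega
      rw [if_neg ht, List.exists_mem_cons_iff, hrk]
      split_ifs with hr h0
      · by_cases hE : (∃ s ∈ rest, pvRankOf s ≤ k) <;> simp [hE, h0]
      · rw [ih r k hr3]
        by_cases hE : (∃ s ∈ rest, pvRankOf s ≤ k) <;> simp [hE] <;> omega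
      · rw [ih b k hb]
        by_cases hE : (∃ s ∈ rest, pvRankOf s ≤ k) <;> simp [hE] <;> omega

theorem pvMemA (l : List (List (String × String))) (x : String) (hx : x ≠ "") :
    PySem.Set.contains (PySem.Set.ofList ((l.filter (fun row => pvTierA row ≠ "")).map pvTierA)) x = true
      ↔ ∃ row ∈ l, pvTierA row = x := by
  rw [PySem.Set.contains_iff, PySem.Set.mem_ofList]
  constructor
  · intro h
    rcases List.mem_map.mp h with ⟨row, hm, hEq⟩
    exact ⟨row, (List.mem_filter.mp hm).1, hEq⟩
  · rintro ⟨row, hm, hEq⟩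
    exact List.mem_map.mpr ⟨row, List.mem_filter.mpr ⟨hm, by simp [hEq, hx]⟩, hEq⟩

theorem pvRankOf_eval (row : List (String × String)) :
    pvRankOf row =
      if pvTierA row = "direct_path" then 0
      else if pvTierA row = "anchored_context" then 1
      else if pvTierA row = "canonical_source" ∨ pvTierA row = "note_match" ∨ pvTierA row = "task_family" then 2
      else 3 := by
  unfold pvRankOf
  rw [pvTable_eval]
  by_cases h : pvTierA row = "" <;> simp_all

theorem pvRank_le0 (row : List (String × String)) :
    pvRankOf row ≤ 0 ↔ pvTierA row = "direct_path" := by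
  rw [pvRankOf_eval]; split_ifs <;> simp_all

theorem pvRank_le1 (row : List (String × String)) :
    pvRankOf row ≤ 1 ↔ pvTierA row = "direct_path" ∨ pvTierA row = "anchored_context" := by
  rw [pvRankOf_eval]; split_ifs <;> simp_all

theorem pvRank_le2 (row : List (String × String)) :
    pvRankOf row ≤ 2 ↔ pvTierA row = "direct_path" ∨ pvTierA row = "anchored_context" ∨
      pvTierA row = "canonical_source" ∨ pvTierA row = "note_match" ∨ pvTierA row = "task_family" := by
  rw [pvRankOf_eval]; split_ifs <;> simp_all

-- ===== VERDICT (by name: the statement is the Claim_ definition above) =====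
theorem guidance_coverage_py_spec : Claim_equal_guidance_coverage_py := by
  intro l _
  unfold Spec_guidance_coverage_py
  have key := fun k => pvBestRank_le_iff l 3 k (by omega)
  have hM3 : pvBestRank 3 l ≤ 3 := (key 3).mpr (Or.inl (by omega))
  have h0 : pvBestRank 3 l ≤ 0 ↔ (∃ row ∈ l, pvTierA row = "direct_path") := by
    rw [key 0]; simp only [pvRank_le0]
    constructor
    · rintro (h | h)
      · omega
      · exact h
    · exact fun h => Or.inr h
  have h1 : pvBestRank 3 l ≤ 1 ↔ (∃ row ∈ l, pvTierA row = "direct_path") ∨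
      (∃ row ∈ l, pvTierA row = "anchored_context") := by
    rw [key 1]; simp only [pvRank_le1]
    constructor
    · rintro (h | ⟨r, hm, (h | h)⟩)
      · omega
      · exact Or.inl ⟨r, hm, h⟩
      · exact Or.inr ⟨r, hm, h⟩
    · rintro (⟨r, hm, h⟩ | ⟨r, hm, h⟩)
      · exact Or.inr ⟨r, hm, Or.inl h⟩
      · exact Or.inr ⟨r, hm, Or.inr h⟩
  have h2 : pvBestRank 3 l ≤ 2 ↔ (∃ row ∈ l, pvTierA row = "direct_path") ∨
      (∃ row ∈ l, pvTierA row = "anchored_context") ∨ (∃ row ∈ l, pvTierA row = "canonical_source") ∨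
      (∃ row ∈ l, pvTierA row = "note_match") ∨ (∃ row ∈ l, pvTierA row = "task_family") := by
    rw [key 2]; simp only [pvRank_le2]
    constructor
    · rintro (h | ⟨r, hm, (h | h | h | h | h)⟩)
      · omega
      · exact Or.inl ⟨r, hm, h⟩
      · exact Or.inr (Or.inl ⟨r, hm, h⟩)
      · exact Or.inr (Or.inr (Or.inl ⟨r, hm, h⟩))
      · exact Or.inr (Or.inr (Or.inr (Or.inl ⟨r, hm, h⟩)))
      · exact Or.inr (Or.inr (Or.inr (Or.inr ⟨r, hm, h⟩)))
    · rintro (⟨r, hm, h⟩ | ⟨r, hm, h⟩ | ⟨r, hm, h⟩ | ⟨r, hm, h⟩ | ⟨r, hm, h⟩)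
      · exact Or.inr ⟨r, hm, Or.inl h⟩
      · exact Or.inr ⟨r, hm, Or.inr (Or.inl h)⟩
      · exact Or.inr ⟨r, hm, Or.inr (Or.inr (Or.inl h))⟩
      · exact Or.inr ⟨r, hm, Or.inr (Or.inr (Or.inr (Or.inl h)))⟩
      · exact Or.inr ⟨r, hm, Or.inr (Or.inr (Or.inr (Or.inr h)))⟩
  simp only [guidance_coverage_py, guidance_coverage_py_alt]
  by_cases E0 : ∃ row ∈ l, pvTierA row = "direct_path"
  · rw [if_pos ((pvMemA l "direct_path" (by decide)).mpr E0)]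
    have hv : pvBestRank 3 l = 0 := Nat.le_zero.mp (h0.mpr E0)
    rw [hv]
  · have c0 : ¬ (PySem.Set.contains (PySem.Set.ofList ((l.filter (fun row => pvTierA row ≠ "")).map pvTierA)) "direct_path" = true) :=
      fun h => E0 ((pvMemA l "direct_path" (by decide)).mp h)
    rw [if_neg c0]
    by_cases E1 : ∃ row ∈ l, pvTierA row = "anchored_context"
    · rw [if_pos ((pvMemA l "anchored_context" (by decide)).mpr E1)]
      have hv : pvBestRank 3 l = 1 := by
        have a := h1.mpr (Or.inr E1)
        have b : ¬ pvBestRank 3 l ≤ 0 := fun h => E0 (h0.mp h)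
        omega
      rw [hv]
    · have c1 : ¬ (PySem.Set.contains (PySem.Set.ofList ((l.filter (fun row => pvTierA row ≠ "")).map pvTierA)) "anchored_context" = true) :=
        fun h => E1 ((pvMemA l "anchored_context" (by decide)).mp h)
      rw [if_neg c1]
      by_cases E2 : (∃ row ∈ l, pvTierA row = "canonical_source") ∨
          (∃ row ∈ l, pvTierA row = "note_match") ∨ (∃ row ∈ l, pvTierA row = "task_family")
      · have hc : (PySem.Set.contains (PySem.Set.ofList ((l.filter (fun row => pvTierA row ≠ "")).map pvTierA)) "canonical_source" ||
            PySem.Set.contains (PySem.Set.ofList ((l.filter (fun row => pvTierA row ≠ "")).map pvTierA)) "note_match" ||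
            PySem.Set.contains (PySem.Set.ofList ((l.filter (fun row => pvTierA row ≠ "")).map pvTierA)) "task_family") = true := by
          rw [Bool.or_eq_true, Bool.or_eq_true]
          rcases E2 with h | h | h
          · exact Or.inl (Or.inl ((pvMemA l "canonical_source" (by decide)).mpr h))
          · exact Or.inl (Or.inr ((pvMemA l "note_match" (by decide)).mpr h))
          · exact Or.inr ((pvMemA l "task_family" (by decide)).mpr h)
        rw [if_pos hc]
        have hv : pvBestRank 3 l = 2 := by
          have a : pvBestRank 3 l ≤ 2 := by
            rcases E2 with h | h | h
            · exact h2.mpr (Or.inr (Or.inr (Or.inl h)))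
            · exact h2.mpr (Or.inr (Or.inr (Or.inr (Or.inl h))))
            · exact h2.mpr (Or.inr (Or.inr (Or.inr (Or.inr h))))
          have b : ¬ pvBestRank 3 l ≤ 1 := fun h => (h1.mp h).elim E0 E1
          omega
        rw [hv]
      · have hc : ¬ ((PySem.Set.contains (PySem.Set.ofList ((l.filter (fun row => pvTierA row ≠ "")).map pvTierA)) "canonical_source" ||
            PySem.Set.contains (PySem.Set.ofList ((l.filter (fun row => pvTierA row ≠ "")).map pvTierA)) "note_match" ||
            PySem.Set.contains (PySem.Set.ofList ((l.filter (fun row => pvTierA row ≠ "")).map pvTierA)) "task_family") = true) := by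
          intro h
          rcases Bool.or_eq_true_iff.mp h with h' | h'
          · rcases Bool.or_eq_true_iff.mp h' with h'' | h''
            · exact E2 (Or.inl ((pvMemA l "canonical_source" (by decide)).mp h''))
            · exact E2 (Or.inr (Or.inl ((pvMemA l "note_match" (by decide)).mp h'')))
          · exact E2 (Or.inr (Or.inr ((pvMemA l "task_family" (by decide)).mp h')))
        rw [if_neg hc]
        have hv : pvBestRank 3 l = 3 := by
          have b : ¬ pvBestRank 3 l ≤ 2 := by
            intro h
            rcases h2.mp h with h' | h' | h' | h' | h'
            · exact E0 h'
            · exact E1 h'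
            · exact E2 (Or.inl h')
            · exact E2 (Or.inr (Or.inl h'))
            · exact E2 (Or.inr (Or.inr h'))
          omega
        rw [hv]
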